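-- pv_equiv track=rewrite | github.com/shbnmzr/thesis-project | scripts/03_prepare_datasets/gfa_extract_validate.py | contig_graph_from_paths
-- ===== SOURCE A (Python) =====
-- from collections import defaultdict, Counter
--
-- def contig_graph_from_paths(contig_paths, kmin_shared=1):
--     # connect contigs sharing >= kmin_shared unitigs
--     u2c = defaultdict(set)
--     for c, walk in contig_paths.items():
--         for u,_ in walk:
--             u2c[u].add(c)
--     es = set()
--     if kmin_shared <= 1:
--         for u, CC in u2c.items():
--             CC = sorted(CC)
--             for i in range(len(CC)):
--                 for j in range(i+1, len(CC)):
--                     es.add((CC[i], CC[j]))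
--     else:
--         # count shared unitigs
--         pairs = Counter()
--         for CC in u2c.values():
--             CC = sorted(CC)
--             for i in range(len(CC)):
--                 for j in range(i+1, len(CC)):
--                     pairs[(CC[i], CC[j])] += 1
--         es = {ab for ab, cnt in pairs.items() if cnt >= kmin_shared}
--     return sorted(es)
-- ===== SOURCE B (Python) =====
-- def contig_graph_from_paths(contig_paths, kmin_shared=1):
--     # contig-indexed pairwise pass: unitig sets per contig, then set intersections
--     c2u = {c: {u for u, _ in walk} for c, walk in contig_paths.items()}
--     t = max(kmin_shared, 1)
--     out = []
--     rest = sorted(c2u)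
--     while rest:
--         a = rest[0]
--         rest = rest[1:]
--         for b in rest:
--             if len(c2u[a] & c2u[b]) >= t:
--                 out.append((a, b))
--     return out
-- ===== Notes on version B (the rewrite author's own statement) =====
-- stated objective: alternative
-- what changed: Replaces the unitig-indexed grouping with its two branches (all-pairs set for kmin_shared<=1, Counter of pair increments otherwise) by a single contig-indexed pass: per-contig unitig sets, then for each sorted contig pair one set intersection compared against max(kmin_shared,1), emitting pairs directly in sorted order.
import Mathlib
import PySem

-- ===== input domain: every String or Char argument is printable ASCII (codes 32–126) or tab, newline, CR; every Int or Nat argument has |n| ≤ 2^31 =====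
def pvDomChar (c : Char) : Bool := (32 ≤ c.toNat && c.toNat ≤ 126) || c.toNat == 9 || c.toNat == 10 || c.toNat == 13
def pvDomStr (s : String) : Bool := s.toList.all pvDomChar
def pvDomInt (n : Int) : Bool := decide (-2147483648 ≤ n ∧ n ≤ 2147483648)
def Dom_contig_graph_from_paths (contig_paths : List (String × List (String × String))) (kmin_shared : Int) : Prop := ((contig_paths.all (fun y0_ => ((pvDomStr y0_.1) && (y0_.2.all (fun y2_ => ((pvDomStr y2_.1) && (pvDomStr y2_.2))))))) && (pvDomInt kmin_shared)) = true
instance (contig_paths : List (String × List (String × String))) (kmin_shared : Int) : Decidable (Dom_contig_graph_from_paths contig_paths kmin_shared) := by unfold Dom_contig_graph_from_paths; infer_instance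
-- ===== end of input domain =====

-- B replaces A's unitig-indexed grouping (two branches: all-pairs set / Counter of pair
-- increments) by one contig-indexed pass: per-contig unitig sets, then one set
-- intersection per sorted contig pair against max(kmin_shared, 1) (objective: alternative).

-- ===== PORT A =====
def contig_graph_from_paths (contig_paths : List (String × List (String × String))) (kmin_shared : Int) : List (String × String) :=
  -- contig_paths.items(): the argument dict, as PySem.Dict from the association list
  let d := PySem.Dict.ofList contig_paths
  -- u2c = defaultdict(set); for c, walk in contig_paths.items(): for u, _ in walk: u2c[u].add(c)
  let u2c : PySem.Dict String (PySem.Set String) :=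
    d.items.foldl (fun u2c cw =>
      cw.2.foldl (fun u2c uo => u2c.modify uo.1 [] (fun s => PySem.Set.add s cw.1)) u2c)
      PySem.Dict.empty
  let es : PySem.Set (String × String) :=
    if kmin_shared ≤ 1 then
      u2c.items.foldl (fun es uCC =>
        let CC := PySem.List.sorted uCC.2 (fun x => x)
        -- for i in range(len(CC)): for j in range(i+1, len(CC)): es.add((CC[i], CC[j]))
        -- CC[i]/CC[j]: indices are in range, so pyGetD with a dummy default is exact
        (PySem.List.pyRange 0 (CC.length : Int)).foldl (fun es i =>
          (PySem.List.pyRange (i+1) (CC.length : Int)).foldl (fun es j =>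
            PySem.Set.add es (PySem.List.pyGetD CC i "", PySem.List.pyGetD CC j "")) es) es)
        PySem.Set.empty
    else
      -- pairs = Counter(); for CC in u2c.values(): … pairs[(CC[i], CC[j])] += 1
      let prs : PySem.Dict (String × String) Int :=
        u2c.values.foldl (fun ps CC0 =>
          let CC := PySem.List.sorted CC0 (fun x => x)
          (PySem.List.pyRange 0 (CC.length : Int)).foldl (fun ps i =>
            (PySem.List.pyRange (i+1) (CC.length : Int)).foldl (fun ps j =>
              ps.modify (PySem.List.pyGetD CC i "", PySem.List.pyGetD CC j "") 0 (· + 1)) ps) ps)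
          PySem.Dict.empty
      -- es = {ab for ab, cnt in pairs.items() if cnt >= kmin_shared}
      PySem.Set.ofList ((prs.items.filter (fun pc => kmin_shared ≤ pc.2)).map (·.1))
  -- return sorted(es): tuples compare lexicographically → sorted2
  PySem.List.sorted2 es (fun x => x.1) (fun x => x.2)

-- ===== PORT B =====
-- while rest: a = rest[0]; rest = rest[1:]; for b in rest: if len(c2u[a] & c2u[b]) >= t: out.append((a, b))
-- c2u[a]/c2u[b]: keys are present (a, b come from sorted(c2u)), so getD is exact
def cgfpAltLoop (c2u : PySem.Dict String (PySem.Set String)) (t : Int) :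
    List String → List (String × String) → List (String × String)
  | [], out => out
  | a :: rest, out =>
      cgfpAltLoop c2u t rest
        (rest.foldl (fun out b =>
          if t ≤ ((PySem.Set.inter (c2u.getD a []) (c2u.getD b [])).length : Int)
          then out ++ [(a, b)] else out) out)

def contig_graph_from_paths_alt (contig_paths : List (String × List (String × String))) (kmin_shared : Int) : List (String × String) :=
  -- c2u = {c: {u for u, _ in walk} for c, walk in contig_paths.items()}
  let c2u : PySem.Dict String (PySem.Set String) :=
    (PySem.Dict.ofList contig_paths).items.foldl
      (fun m cw => m.insert cw.1 (PySem.Set.ofList (cw.2.map (fun uo => uo.1)))) PySem.Dict.empty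
  let t := max kmin_shared 1
  -- rest = sorted(c2u); out accumulated by cgfpAltLoop; return out
  cgfpAltLoop c2u t (PySem.List.sorted c2u.keys (fun x => x)) []

-- ===== PRECONDITION & SPEC =====
def Spec_contig_graph_from_paths (contig_paths : List (String × List (String × String))) (kmin_shared : Int) (out : List (String × String)) : Prop := out = contig_graph_from_paths_alt contig_paths kmin_shared
instance (contig_paths : List (String × List (String × String))) (kmin_shared : Int) (out : List (String × String)) : Decidable (Spec_contig_graph_from_paths contig_paths kmin_shared out) := by unfold Spec_contig_graph_from_paths; infer_instance

-- ===== CLAIM (what is proved, stated in full; the proofs are below) =====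
def Claim_equal_contig_graph_from_paths : Prop := ∀ (contig_paths : List (String × List (String × String))) (kmin_shared : Int), Dom_contig_graph_from_paths contig_paths kmin_shared → Spec_contig_graph_from_paths contig_paths kmin_shared (contig_graph_from_paths contig_paths kmin_shared)

-- ===== LEMMAS AND PROOFS =====

def pvPairs {α : Type} : List α → List (α × α)
  | [] => []
  | x :: t => t.map (fun b => (x, b)) ++ pvPairs t

lemma pvPairs_mem_of_mem {α : Type} {L : List α} {y : α × α} (h : y ∈ pvPairs L) :
    y.1 ∈ L ∧ y.2 ∈ L := by
  induction L with
  | nil => simp [pvPairs] at h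
  | cons x t ih =>
    simp only [pvPairs, List.mem_append, List.mem_map] at h
    rcases h with ⟨b, hb, rfl⟩ | h
    · exact ⟨List.mem_cons_self, List.mem_cons_of_mem _ hb⟩
    · exact ⟨List.mem_cons_of_mem _ (ih h).1, List.mem_cons_of_mem _ (ih h).2⟩

lemma pvPairs_mem_iff {α : Type} [LinearOrder α] {L : List α} (hL : L.Pairwise (· < ·))
    (y : α × α) : y ∈ pvPairs L ↔ y.1 ∈ L ∧ y.2 ∈ L ∧ y.1 < y.2 := by
  induction L with
  | nil => simp [pvPairs]
  | cons x t ih =>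
    rcases y with ⟨a, b⟩
    have hx : ∀ z ∈ t, x < z := fun z hz => (List.pairwise_cons.mp hL).1 z hz
    simp only [pvPairs, List.mem_append, List.mem_map, List.mem_cons,
      ih (List.pairwise_cons.mp hL).2]
    constructor
    · rintro (⟨c, hc, h⟩ | ⟨h1, h2, h3⟩)
      · obtain ⟨rfl, rfl⟩ : a = x ∧ b = c := by
          constructor <;> { injection h with h1 h2; simp [h1.symm, h2.symm] }
        exact ⟨Or.inl rfl, Or.inr hc, hx _ hc⟩
      · exact ⟨Or.inr h1, Or.inr h2, h3⟩
    · rintro ⟨(rfl | ha), (rfl | hb), hab⟩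
      · exact absurd hab (lt_irrefl _)
      · exact Or.inl ⟨b, hb, rfl⟩
      · exact absurd (hx _ ha) (lt_asymm hab)
      · exact Or.inr ⟨ha, hb, hab⟩

lemma pvPairs_nodup {α : Type} {L : List α} (h : L.Nodup) : (pvPairs L).Nodup := by
  induction L with
  | nil => simp [pvPairs]
  | cons x t ih =>
    rcases List.nodup_cons.mp h with ⟨hx, ht⟩
    refine List.Nodup.append ?_ (ih ht) ?_
    · exact ht.map (fun a b hab => by injection hab)
    · intro y h1 h2
      rcases List.mem_map.mp h1 with ⟨c, _, rfl⟩
      exact hx (pvPairs_mem_of_mem h2).1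

lemma pvPairs_pairwise_lex {L : List String} (hL : L.Pairwise (· < ·)) :
    (pvPairs L).Pairwise (fun a b => toLex a < toLex b) := by
  induction L with
  | nil => simp [pvPairs]
  | cons x t ih =>
    rcases List.pairwise_cons.mp hL with ⟨hx, ht⟩
    rw [pvPairs, List.pairwise_append]
    refine ⟨?_, ih ht, ?_⟩
    · rw [List.pairwise_map]
      refine ht.imp ?_
      intro a b hab
      exact Prod.Lex.lt_iff.mpr (Or.inr ⟨rfl, hab⟩)
    · intro p hp q hq
      rcases List.mem_map.mp hp with ⟨c, _, rfl⟩
      exact Prod.Lex.lt_iff.mpr (Or.inl (hx _ (pvPairs_mem_of_mem hq).1))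

lemma pvPyRange_nil {a b : Int} (h : b ≤ a) : PySem.List.pyRange a b = [] := by
  rw [List.eq_nil_iff_forall_not_mem]
  intro x hx
  have := PySem.List.mem_pyRange_one.mp hx
  omega

lemma pvPyRange_shift (a b : Int) :
    PySem.List.pyRange (a + 1) (b + 1) = (PySem.List.pyRange a b).map (· + 1) := by
  have key : ∀ n : Nat, ∀ a : Int, (b - a).toNat = n →
      PySem.List.pyRange (a + 1) (b + 1) = (PySem.List.pyRange a b).map (· + 1) := by
    intro n
    induction n with
    | zero =>
      intro a ha
      rw [pvPyRange_nil (by omega), pvPyRange_nil (by omega), List.map_nil]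
    | succ m ih =>
      intro a ha
      rw [show PySem.List.pyRange a b = a :: PySem.List.pyRange (a + 1) b from
          PySem.List.pyRange_one_cons (by omega), List.map_cons,
        PySem.List.pyRange_one_cons (show a + 1 < b + 1 by omega)]
      exact congrArg (List.cons (a + 1)) (ih (a + 1) (by omega))
  exact key _ a rfl

lemma pvPyGetD_cons_succ {α : Type} (x : α) (t : List α) {j : Int} (d : α) (h : 0 ≤ j) :
    PySem.List.pyGetD (x :: t) (j + 1) d = PySem.List.pyGetD t j d := by
  rw [PySem.List.pyGetD_of_nonneg _ _ (by omega), PySem.List.pyGetD_of_nonneg _ _ h]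
  have hj : (j + 1).toNat = j.toNat + 1 := by omega
  rw [hj, List.getD_cons_succ]

lemma pvFoldlRangeGetD {α β : Type} (t : List α) (d : α) (f : β → α → β) (s : β) :
    (List.range t.length).foldl (fun s k => f s (t.getD k d)) s = t.foldl f s := by
  induction t generalizing s with
  | nil => simp
  | cons x t ih =>
    rw [List.length_cons, List.range_succ_eq_map, List.foldl_cons, List.foldl_map]
    simp only [List.getD_cons_succ, List.getD_cons_zero]
    rw [ih, List.foldl_cons]

lemma pvMemFoldlStep {α β : Type} (l : List β) (step : List α → β → List α)
    (P : β → α → Prop) (h : ∀ s u y, y ∈ step s u ↔ y ∈ s ∨ P u y) (s : List α) (y : α) :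
    y ∈ l.foldl step s ↔ y ∈ s ∨ ∃ u ∈ l, P u y := by
  induction l generalizing s with
  | nil => simp
  | cons u l ih =>
    rw [List.foldl_cons, ih, h]
    simp only [List.mem_cons]
    constructor
    · rintro ((hy | hp) | ⟨v, hv, hp⟩)
      · exact Or.inl hy
      · exact Or.inr ⟨u, Or.inl rfl, hp⟩
      · exact Or.inr ⟨v, Or.inr hv, hp⟩
    · rintro (hy | ⟨v, (rfl | hv), hp⟩)
      · exact Or.inl (Or.inl hy)
      · exact Or.inl (Or.inr hp)
      · exact Or.inr ⟨v, hv, hp⟩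

lemma pvNodupFoldl {α β : Type} (l : List β) (step : List α → β → List α)
    (h : ∀ s u, s.Nodup → (step s u).Nodup) (s : List α) (hs : s.Nodup) :
    (l.foldl step s).Nodup := by
  induction l generalizing s with
  | nil => exact hs
  | cons u l ih => exact ih _ (h s u hs)

lemma pvDoubleLoop {α β : Type} (L : List α) (d : α) (f : β → α × α → β) (s : β) :
    (PySem.List.pyRange 0 (L.length : Int)).foldl (fun s i =>
      (PySem.List.pyRange (i + 1) (L.length : Int)).foldl (fun s j =>
        f s (PySem.List.pyGetD L i d, PySem.List.pyGetD L j d)) s) s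
    = (pvPairs L).foldl f s := by
  induction L generalizing s with
  | nil => rw [pvPyRange_nil (by simp)]; rfl
  | cons x t ih =>
    have hlen : ((x :: t).length : Int) = (t.length : Int) + 1 := by
      simp [List.length_cons]
    rw [hlen]
    rw [PySem.List.pyRange_one_cons (by omega), List.foldl_cons]
    -- first iteration i = 0
    have h0 : (PySem.List.pyRange (0 + 1) ((t.length : Int) + 1)).foldl (fun s j =>
        f s (PySem.List.pyGetD (x :: t) 0 d, PySem.List.pyGetD (x :: t) j d)) s
        = (t.map (fun b => (x, b))).foldl f s := by
      rw [show ((0 : Int) + 1) = (0 : Int) + 1 from rfl, pvPyRange_shift 0 (t.length : Int),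
        List.foldl_map]
      have hcongr : ∀ s' : β, ∀ j ∈ PySem.List.pyRange 0 (t.length : Int),
          f s' (PySem.List.pyGetD (x :: t) 0 d, PySem.List.pyGetD (x :: t) (j + 1) d)
          = f s' (x, PySem.List.pyGetD t j d) := by
        intro s' j hj
        have h0j : 0 ≤ j := (PySem.List.mem_pyRange_one.mp hj).1
        rw [pvPyGetD_cons_succ x t d h0j,
          show PySem.List.pyGetD (x :: t) 0 d = x by
            rw [PySem.List.pyGetD_of_nonneg _ _ le_rfl]; rfl]
      rw [PySem.List.foldl_congr_mem _ _ _ _ hcongr]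
      rw [PySem.List.pyRange_zero_natCast, List.foldl_map]
      have : ∀ s' : β, ∀ k ∈ List.range t.length,
          f s' (x, PySem.List.pyGetD t (k : Int) d) = f s' (x, t.getD k d) := by
        intro s' k _
        rw [PySem.List.pyGetD_natCast]
      rw [PySem.List.foldl_congr_mem _ _ _ _ this]
      rw [pvFoldlRangeGetD t d (fun s b => f s (x, b)) s, List.foldl_map]
    rw [h0]
    -- remaining iterations
    have hrest : (PySem.List.pyRange (0 + 1) ((t.length : Int) + 1)).foldl (fun s i =>
        (PySem.List.pyRange (i + 1) ((t.length : Int) + 1)).foldl (fun s j =>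
          f s (PySem.List.pyGetD (x :: t) i d, PySem.List.pyGetD (x :: t) j d)) s)
        ((t.map (fun b => (x, b))).foldl f s)
        = (pvPairs t).foldl f ((t.map (fun b => (x, b))).foldl f s) := by
      rw [show ((0 : Int) + 1) = (0 : Int) + 1 from rfl, pvPyRange_shift 0 (t.length : Int),
        List.foldl_map]
      have hbody : ∀ s' : β, ∀ i ∈ PySem.List.pyRange 0 (t.length : Int),
          (PySem.List.pyRange (i + 1 + 1) ((t.length : Int) + 1)).foldl (fun s j =>
            f s (PySem.List.pyGetD (x :: t) (i + 1) d, PySem.List.pyGetD (x :: t) j d)) s'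
          = (PySem.List.pyRange (i + 1) (t.length : Int)).foldl (fun s j =>
            f s (PySem.List.pyGetD t i d, PySem.List.pyGetD t j d)) s' := by
        intro s' i hi
        have h0i : 0 ≤ i := (PySem.List.mem_pyRange_one.mp hi).1
        rw [pvPyRange_shift (i + 1) (t.length : Int), List.foldl_map]
        refine PySem.List.foldl_congr_mem _ _ _ _ ?_
        intro acc j hj
        have h0j : 0 ≤ j := by
          have := (PySem.List.mem_pyRange_one.mp hj).1; omega
        rw [pvPyGetD_cons_succ x t d h0i, pvPyGetD_cons_succ x t d h0j]
      rw [PySem.List.foldl_congr_mem _ _ _ _ hbody]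
      exact ih ((t.map (fun b => (x, b))).foldl f s)
    rw [hrest, pvPairs, List.foldl_append]

def cgfpItems (cp : List (String × List (String × String))) :
    List (String × List (String × String)) := (PySem.Dict.ofList cp).items

def cgfpU2c (cp : List (String × List (String × String))) :
    PySem.Dict String (PySem.Set String) :=
  (cgfpItems cp).foldl (fun u2c cw =>
    cw.2.foldl (fun u2c uo => u2c.modify uo.1 [] (fun s => PySem.Set.add s cw.1)) u2c)
    PySem.Dict.empty

def cgfpG (cp : List (String × List (String × String))) (u : String) : PySem.Set String :=
  (cgfpU2c cp).getD u []

lemma cgfp_inner_getD (walk : List (String × String)) (c : String)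
    (m : PySem.Dict String (PySem.Set String)) (u : String) :
    (walk.foldl (fun m q => m.modify q.1 [] (fun s => PySem.Set.add s c)) m).getD u []
    = if u ∈ walk.map (fun q => q.1) then PySem.Set.add (m.getD u []) c else m.getD u [] := by
  induction walk generalizing m with
  | nil => simp
  | cons q w ih =>
    rw [List.foldl_cons, ih, PySem.Dict.getD_modify]
    simp only [List.map_cons, List.mem_cons]
    by_cases h2 : u = q.1
    · rw [h2]
      by_cases h1 : q.1 ∈ w.map (fun q => q.1)
      · rw [if_pos h1, if_pos rfl, if_pos (Or.inl rfl),
          PySem.Set.add_of_mem ((PySem.Set.mem_add _ _ _).mpr (Or.inr rfl))]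
      · rw [if_neg h1, if_pos rfl, if_pos (Or.inl rfl)]
    · by_cases h1 : u ∈ w.map (fun q => q.1)
      · rw [if_pos h1, if_neg h2, if_pos (Or.inr h1)]
      · rw [if_neg h1, if_neg h2, if_neg (by rintro (h | h); exact h2 h; exact h1 h)]

lemma cgfp_u2c_fold_mem (l : List (String × List (String × String)))
    (m : PySem.Dict String (PySem.Set String)) (u c : String) :
    c ∈ ((l.foldl (fun u2c cw =>
        cw.2.foldl (fun u2c uo => u2c.modify uo.1 [] (fun s => PySem.Set.add s cw.1)) u2c) m).getD u [])
    ↔ c ∈ m.getD u [] ∨ ∃ cw ∈ l, cw.1 = c ∧ u ∈ cw.2.map (fun q => q.1) := by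
  induction l generalizing m with
  | nil => simp
  | cons cw l ih =>
    rw [List.foldl_cons, ih, cgfp_inner_getD]
    by_cases hw : u ∈ cw.2.map (fun q => q.1)
    · rw [if_pos hw, PySem.Set.mem_add]
      constructor
      · rintro ((hc | rfl) | h)
        · exact Or.inl hc
        · exact Or.inr ⟨cw, List.mem_cons_self, rfl, hw⟩
        · exact Or.inr (by rcases h with ⟨v, hv, h1, h2⟩; exact ⟨v, List.mem_cons_of_mem _ hv, h1, h2⟩)
      · rintro (hc | ⟨v, hv, h1, h2⟩)
        · exact Or.inl (Or.inl hc)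
        · rcases List.mem_cons.mp hv with rfl | hv
          · exact Or.inl (Or.inr h1.symm)
          · exact Or.inr ⟨v, hv, h1, h2⟩
    · rw [if_neg hw]
      constructor
      · rintro (hc | h)
        · exact Or.inl hc
        · exact Or.inr (by rcases h with ⟨v, hv, h1, h2⟩; exact ⟨v, List.mem_cons_of_mem _ hv, h1, h2⟩)
      · rintro (hc | ⟨v, hv, h1, h2⟩)
        · exact Or.inl hc
        · rcases List.mem_cons.mp hv with rfl | hv
          · exact absurd h2 hw
          · exact Or.inr ⟨v, hv, h1, h2⟩

lemma cgfp_mem_G {cp : List (String × List (String × String))} {u c : String} :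
    c ∈ cgfpG cp u ↔ ∃ cw ∈ cgfpItems cp, cw.1 = c ∧ u ∈ cw.2.map (fun q => q.1) := by
  rw [cgfpG, cgfpU2c, cgfp_u2c_fold_mem]
  simp [PySem.Dict.getD_empty]

lemma cgfp_u2c_fold_nodup (l : List (String × List (String × String)))
    (m : PySem.Dict String (PySem.Set String)) (hm : ∀ u, (m.getD u []).Nodup) (u : String) :
    ((l.foldl (fun u2c cw =>
        cw.2.foldl (fun u2c uo => u2c.modify uo.1 [] (fun s => PySem.Set.add s cw.1)) u2c) m).getD u []).Nodup := by
  induction l generalizing m with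
  | nil => exact hm u
  | cons cw l ih =>
    rw [List.foldl_cons]
    refine ih _ ?_
    intro v
    rw [cgfp_inner_getD]
    by_cases hw : v ∈ cw.2.map (fun q => q.1)
    · rw [if_pos hw]; exact PySem.Set.nodup_add _ _ (hm v)
    · rw [if_neg hw]; exact hm v

lemma cgfp_nodup_G (cp : List (String × List (String × String))) (u : String) :
    (cgfpG cp u).Nodup := by
  rw [cgfpG, cgfpU2c]
  exact cgfp_u2c_fold_nodup _ _ (fun v => by simp) u

lemma cgfp_u2c_fold_keys (l : List (String × List (String × String)))
    (m : PySem.Dict String (PySem.Set String)) (u : String) :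
    (u ∈ (l.foldl (fun u2c cw =>
        cw.2.foldl (fun u2c uo => u2c.modify uo.1 [] (fun s => PySem.Set.add s cw.1)) u2c) m).keys
    ↔ u ∈ m.keys ∨ ∃ cw ∈ l, u ∈ cw.2.map (fun q => q.1)) := by
  induction l generalizing m with
  | nil => simp
  | cons cw l ih =>
    rw [List.foldl_cons, ih]
    rw [PySem.Dict.keys_foldl_modify_key cw.2 (fun q => q.1) [] (fun _ _ => fun s => PySem.Set.add s cw.1) m]
    rw [PySem.Set.mem_update]
    constructor
    · rintro ((h | h) | ⟨v, hv, h⟩)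
      · exact Or.inl h
      · exact Or.inr ⟨cw, List.mem_cons_self, h⟩
      · exact Or.inr ⟨v, List.mem_cons_of_mem _ hv, h⟩
    · rintro (h | ⟨v, hv, h⟩)
      · exact Or.inl (Or.inl h)
      · rcases List.mem_cons.mp hv with rfl | hv
        · exact Or.inl (Or.inr h)
        · exact Or.inr ⟨v, hv, h⟩

lemma cgfp_mem_u2c_keys {cp : List (String × List (String × String))} {u : String} :
    u ∈ (cgfpU2c cp).keys ↔ ∃ cw ∈ cgfpItems cp, u ∈ cw.2.map (fun q => q.1) := by
  rw [cgfpU2c, cgfp_u2c_fold_keys]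
  simp

lemma cgfp_u2c_fold_keys_nodup (l : List (String × List (String × String)))
    (m : PySem.Dict String (PySem.Set String)) (hm : m.keys.Nodup) :
    (l.foldl (fun u2c cw =>
        cw.2.foldl (fun u2c uo => u2c.modify uo.1 [] (fun s => PySem.Set.add s cw.1)) u2c) m).keys.Nodup := by
  induction l generalizing m with
  | nil => exact hm
  | cons cw l ih =>
    rw [List.foldl_cons]
    refine ih _ ?_
    rw [PySem.Dict.keys_foldl_modify_key cw.2 (fun q => q.1) [] (fun _ _ => fun s => PySem.Set.add s cw.1) m]
    exact PySem.Set.nodup_update _ _ hm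

lemma cgfp_nodup_u2c_keys (cp : List (String × List (String × String))) :
    (cgfpU2c cp).keys.Nodup := by
  rw [cgfpU2c]
  exact cgfp_u2c_fold_keys_nodup _ _ (by simp)

def cgfpC2u (cp : List (String × List (String × String))) :
    PySem.Dict String (PySem.Set String) :=
  (cgfpItems cp).foldl
    (fun m cw => m.insert cw.1 (PySem.Set.ofList (cw.2.map (fun uo => uo.1)))) PySem.Dict.empty

def cgfpS (cp : List (String × List (String × String))) (c : String) : PySem.Set String :=
  (cgfpC2u cp).getD c []

def cgfpCnt (cp : List (String × List (String × String))) (a b : String) : Nat :=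
  (cgfpU2c cp).keys.countP (fun u => decide (a ∈ cgfpG cp u ∧ b ∈ cgfpG cp u))

def cgfpE (cp : List (String × List (String × String))) (k : Int) (y : String × String) : Prop :=
  y.1 < y.2 ∧ max k 1 ≤ (cgfpCnt cp y.1 y.2 : Int)

lemma cgfp_items_fst_nodup (cp : List (String × List (String × String))) :
    ((cgfpItems cp).map (fun cw => cw.1)).Nodup := by
  have := PySem.Dict.nodup_keys_ofList cp
  simpa [PySem.Dict.keys, cgfpItems] using this

lemma cgfp_c2u_items (cp : List (String × List (String × String))) :
    (cgfpC2u cp).items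
    = (cgfpItems cp).map (fun cw => (cw.1, PySem.Set.ofList (cw.2.map (fun uo => uo.1)))) := by
  rw [cgfpC2u]
  rw [PySem.Dict.items_foldl_insert_fresh (cgfpItems cp) (fun cw => cw.1)
    (fun cw => PySem.Set.ofList (cw.2.map (fun uo => uo.1))) PySem.Dict.empty
    (fun a _ => by simp) (cgfp_items_fst_nodup cp)]
  rfl

lemma cgfp_c2u_keys (cp : List (String × List (String × String))) :
    (cgfpC2u cp).keys = (cgfpItems cp).map (fun cw => cw.1) := by
  rw [PySem.Dict.keys, cgfp_c2u_items, List.map_map]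
  rfl

lemma cgfp_c2u_keys_nodup (cp : List (String × List (String × String))) :
    (cgfpC2u cp).keys.Nodup := by
  rw [cgfp_c2u_keys]; exact cgfp_items_fst_nodup cp

lemma cgfp_mem_S {cp : List (String × List (String × String))} {c u : String} :
    u ∈ cgfpS cp c ↔ ∃ cw ∈ cgfpItems cp, cw.1 = c ∧ u ∈ cw.2.map (fun q => q.1) := by
  rw [cgfpS]
  by_cases hc : c ∈ (cgfpC2u cp).keys
  · -- c is a key: getD is its stored set
    rw [cgfp_c2u_keys, List.mem_map] at hc
    rcases hc with ⟨cw, hcw, rfl⟩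
    have hmem : (cw.1, PySem.Set.ofList (cw.2.map (fun uo => uo.1))) ∈ (cgfpC2u cp).items := by
      rw [cgfp_c2u_items]; exact List.mem_map.mpr ⟨cw, hcw, rfl⟩
    rw [PySem.Dict.getD_of_mem_items _ hmem (cgfp_c2u_keys_nodup cp)]
    rw [PySem.Set.mem_ofList]
    constructor
    · intro h; exact ⟨cw, hcw, rfl, h⟩
    · rintro ⟨cw', hcw', h1, h2⟩
      have : cw' = cw := by
        have hnd := cgfp_items_fst_nodup cp
        have := List.inj_on_of_nodup_map hnd hcw' hcw h1
        exact this
      rw [← this]; exact h2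
  · rw [PySem.Dict.getD_of_not_contains _ _ (by
      rw [PySem.Dict.contains_eq_decide_mem_keys]; simpa using hc)]
    simp only [List.not_mem_nil, false_iff]
    rintro ⟨cw, hcw, rfl, _⟩
    exact hc (by rw [cgfp_c2u_keys]; exact List.mem_map.mpr ⟨cw, hcw, rfl⟩)

lemma cgfp_mem_S_G {cp : List (String × List (String × String))} {c u : String} :
    c ∈ cgfpG cp u ↔ u ∈ cgfpS cp c := by
  rw [cgfp_mem_G, cgfp_mem_S]

lemma cgfp_nodup_S (cp : List (String × List (String × String))) (c : String) :
    (cgfpS cp c).Nodup := by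
  rw [cgfpS]
  by_cases hc : c ∈ (cgfpC2u cp).keys
  · rw [cgfp_c2u_keys, List.mem_map] at hc
    rcases hc with ⟨cw, hcw, rfl⟩
    have hmem : (cw.1, PySem.Set.ofList (cw.2.map (fun uo => uo.1))) ∈ (cgfpC2u cp).items := by
      rw [cgfp_c2u_items]; exact List.mem_map.mpr ⟨cw, hcw, rfl⟩
    rw [PySem.Dict.getD_of_mem_items _ hmem (cgfp_c2u_keys_nodup cp)]
    exact PySem.Set.nodup_ofList _
  · rw [PySem.Dict.getD_of_not_contains _ _ (by
      rw [PySem.Dict.contains_eq_decide_mem_keys]; simpa using hc)]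
    exact List.nodup_nil

lemma cgfp_mem_S_u2c_keys {cp : List (String × List (String × String))} {c u : String}
    (h : u ∈ cgfpS cp c) : u ∈ (cgfpU2c cp).keys := by
  rw [cgfp_mem_S] at h
  rcases h with ⟨cw, hcw, _, h2⟩
  exact cgfp_mem_u2c_keys.mpr ⟨cw, hcw, h2⟩

lemma cgfp_cnt_eq_inter (cp : List (String × List (String × String))) (a b : String) :
    cgfpCnt cp a b = (PySem.Set.inter (cgfpS cp a) (cgfpS cp b)).length := by
  rw [cgfpCnt, List.countP_eq_length_filter]
  have h1 : ((cgfpU2c cp).keys.filter (fun u => decide (a ∈ cgfpG cp u ∧ b ∈ cgfpG cp u))).Nodup :=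
    (cgfp_nodup_u2c_keys cp).filter _
  have h2 : (PySem.Set.inter (cgfpS cp a) (cgfpS cp b)).Nodup :=
    PySem.Set.nodup_inter _ _ (cgfp_nodup_S cp a)
  have hperm : ((cgfpU2c cp).keys.filter (fun u => decide (a ∈ cgfpG cp u ∧ b ∈ cgfpG cp u))).Perm
      (PySem.Set.inter (cgfpS cp a) (cgfpS cp b)) := by
    rw [List.perm_ext_iff_of_nodup h1 h2]
    intro u
    rw [List.mem_filter, PySem.Set.mem_inter]
    constructor
    · rintro ⟨_, h⟩
      rcases of_decide_eq_true h with ⟨ha, hb⟩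
      exact ⟨cgfp_mem_S_G.mp ha, cgfp_mem_S_G.mp hb⟩
    · rintro ⟨ha, hb⟩
      exact ⟨cgfp_mem_S_u2c_keys ha, decide_eq_true ⟨cgfp_mem_S_G.mpr ha, cgfp_mem_S_G.mpr hb⟩⟩
  exact hperm.length_eq

lemma cgfp_sorted_pairwise_lt {CC : PySem.Set String} (h : CC.Nodup) :
    (PySem.List.sorted CC (fun x => x)).Pairwise (· < ·) := by
  have hle : (PySem.List.sorted CC (fun x => x)).Pairwise (· ≤ ·) :=
    PySem.List.sorted_pairwise CC (fun x => x)
  have hnd : (PySem.List.sorted CC (fun x => x)).Nodup :=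
    (PySem.List.sorted_perm CC (fun x => x) false).nodup_iff.mpr h
  exact (hle.and hnd).imp (fun h => lt_of_le_of_ne h.1 h.2)

lemma cgfp_mem_pvPairs_sorted {CC : PySem.Set String} (h : CC.Nodup) (y : String × String) :
    y ∈ pvPairs (PySem.List.sorted CC (fun x => x)) ↔ y.1 ∈ CC ∧ y.2 ∈ CC ∧ y.1 < y.2 := by
  rw [pvPairs_mem_iff (cgfp_sorted_pairwise_lt h)]
  rw [(PySem.List.sorted_perm CC (fun x => x) false).mem_iff,
    (PySem.List.sorted_perm CC (fun x => x) false).mem_iff]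

lemma cgfp_mem_u2c_items {cp : List (String × List (String × String))}
    {uCC : String × PySem.Set String} :
    uCC ∈ (cgfpU2c cp).items ↔ uCC.1 ∈ (cgfpU2c cp).keys ∧ uCC.2 = cgfpG cp uCC.1 := by
  constructor
  · intro h
    refine ⟨PySem.Dict.mem_keys_of_mem_items _ h, ?_⟩
    rw [cgfpG, PySem.Dict.getD_of_mem_items _ (show (uCC.1, uCC.2) ∈ (cgfpU2c cp).items from h)
      (cgfp_nodup_u2c_keys cp) []]
  · rintro ⟨hk, hv⟩
    rcases hq : (cgfpU2c cp).get? uCC.1 with _ | v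
    · exact absurd ((PySem.Dict.get?_eq_none_iff_not_mem_keys _ _).mp hq) (by simpa using hk)
    · have hvv : v = uCC.2 := by
        rw [hv, cgfpG, PySem.Dict.getD_eq_get?_getD, hq]; rfl
    -- incomplete
      have := PySem.Dict.mem_items_of_get?_eq_some _ hq
      rw [hvv] at this
      exact this

def cgfpEsA (cp : List (String × List (String × String))) (k : Int) : PySem.Set (String × String) :=
  if k ≤ 1 then
    (cgfpU2c cp).items.foldl (fun es uCC =>
      (PySem.List.pyRange 0 ((PySem.List.sorted uCC.2 (fun x => x)).length : Int)).foldl (fun es i =>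
        (PySem.List.pyRange (i+1) ((PySem.List.sorted uCC.2 (fun x => x)).length : Int)).foldl (fun es j =>
          PySem.Set.add es (PySem.List.pyGetD (PySem.List.sorted uCC.2 (fun x => x)) i "",
            PySem.List.pyGetD (PySem.List.sorted uCC.2 (fun x => x)) j "")) es) es)
      PySem.Set.empty
  else
    PySem.Set.ofList ((((cgfpU2c cp).values.foldl (fun ps CC0 =>
      (PySem.List.pyRange 0 ((PySem.List.sorted CC0 (fun x => x)).length : Int)).foldl (fun ps i =>
        (PySem.List.pyRange (i+1) ((PySem.List.sorted CC0 (fun x => x)).length : Int)).foldl (fun ps j =>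
          ps.modify (PySem.List.pyGetD (PySem.List.sorted CC0 (fun x => x)) i "",
            PySem.List.pyGetD (PySem.List.sorted CC0 (fun x => x)) j "") 0 (· + 1)) ps) ps)
      PySem.Dict.empty).items.filter (fun pc => k ≤ pc.2)).map (·.1))

lemma cgfp_esA_branch1 (cp : List (String × List (String × String))) (k : Int) (hk : k ≤ 1) :
    cgfpEsA cp k = (cgfpU2c cp).items.foldl (fun es uCC =>
      (pvPairs (PySem.List.sorted uCC.2 (fun x => x))).foldl (fun es ab => PySem.Set.add es ab) es)
      PySem.Set.empty := by
  rw [cgfpEsA, if_pos hk]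
  exact PySem.List.foldl_congr_mem _ _ _ _
    (fun es uCC _ => pvDoubleLoop (PySem.List.sorted uCC.2 (fun x => x)) ""
      (fun es ab => PySem.Set.add es ab) es)

def cgfpPrs (cp : List (String × List (String × String))) : PySem.Dict (String × String) Int :=
  (cgfpU2c cp).values.foldl (fun ps CC0 =>
    (pvPairs (PySem.List.sorted CC0 (fun x => x))).foldl (fun ps ab => ps.modify ab 0 (· + 1)) ps)
    PySem.Dict.empty

lemma cgfp_esA_branch2 (cp : List (String × List (String × String))) (k : Int) (hk : ¬ k ≤ 1) :
    cgfpEsA cp k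
    = PySem.Set.ofList (((cgfpPrs cp).items.filter (fun pc => k ≤ pc.2)).map (·.1)) := by
  rw [cgfpEsA, if_neg hk, cgfpPrs]
  congr 1
  refine congrArg _ (congrArg _ (congrArg _ ?_))
  exact PySem.List.foldl_congr_mem _ _ _ _
    (fun ps CC0 _ => pvDoubleLoop (PySem.List.sorted CC0 (fun x => x)) ""
      (fun ps ab => ps.modify ab 0 (· + 1)) ps)

lemma cgfp_prs_fold_getD (VV : List (PySem.Set String)) (d : PySem.Dict (String × String) Int)
    (hVV : ∀ CC ∈ VV, CC.Nodup) (ab : String × String) :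
    (VV.foldl (fun ps CC0 =>
      (pvPairs (PySem.List.sorted CC0 (fun x => x))).foldl (fun ps ab => ps.modify ab 0 (· + 1)) ps) d).getD ab 0
    = d.getD ab 0 + (VV.countP (fun CC => decide (ab ∈ pvPairs (PySem.List.sorted CC (fun x => x)))) : Int) := by
  induction VV generalizing d with
  | nil => simp
  | cons CC VV ih =>
    rw [List.foldl_cons, ih _ (fun C hC => hVV C (List.mem_cons_of_mem _ hC))]
    rw [PySem.Dict.getD_foldl_modify_add_one]
    have hnd : (pvPairs (PySem.List.sorted CC (fun x => x))).Nodup :=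
      pvPairs_nodup ((PySem.List.sorted_perm CC (fun x => x) false).nodup_iff.mpr
        (hVV CC List.mem_cons_self))
    rw [List.countP_cons]
    by_cases hmem : ab ∈ pvPairs (PySem.List.sorted CC (fun x => x))
    · rw [List.count_eq_one_of_mem hnd hmem]
      simp [hmem]
      omega
    · rw [List.count_eq_zero_of_not_mem hmem]
      simp [hmem]

lemma cgfp_prs_fold_keys (VV : List (PySem.Set String)) (d : PySem.Dict (String × String) Int)
    (ab : String × String) :
    (ab ∈ (VV.foldl (fun ps CC0 =>
      (pvPairs (PySem.List.sorted CC0 (fun x => x))).foldl (fun ps ab => ps.modify ab 0 (· + 1)) ps) d).keys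
    ↔ ab ∈ d.keys ∨ ∃ CC ∈ VV, ab ∈ pvPairs (PySem.List.sorted CC (fun x => x))) := by
  induction VV generalizing d with
  | nil => simp
  | cons CC VV ih =>
    rw [List.foldl_cons, ih]
    rw [PySem.Dict.keys_foldl_modify_key _ (fun ab => ab) 0 (fun _ _ => fun v => v + 1) d]
    rw [PySem.Set.mem_update, List.map_id']
    constructor
    · rintro ((h | h) | ⟨C, hC, h⟩)
      · exact Or.inl h
      · exact Or.inr ⟨CC, List.mem_cons_self, h⟩
      · exact Or.inr ⟨C, List.mem_cons_of_mem _ hC, h⟩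
    · rintro (h | ⟨C, hC, h⟩)
      · exact Or.inl (Or.inl h)
      · rcases List.mem_cons.mp hC with rfl | hC
        · exact Or.inl (Or.inr h)
        · exact Or.inr ⟨C, hC, h⟩

lemma cgfp_prs_fold_keys_nodup (VV : List (PySem.Set String)) (d : PySem.Dict (String × String) Int)
    (hd : d.keys.Nodup) :
    (VV.foldl (fun ps CC0 =>
      (pvPairs (PySem.List.sorted CC0 (fun x => x))).foldl (fun ps ab => ps.modify ab 0 (· + 1)) ps) d).keys.Nodup := by
  induction VV generalizing d with
  | nil => exact hd
  | cons CC VV ih =>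
    rw [List.foldl_cons]
    refine ih _ ?_
    rw [PySem.Dict.keys_foldl_modify_key _ (fun ab => ab) 0 (fun _ _ => fun v => v + 1) d]
    exact PySem.Set.nodup_update _ _ hd

lemma cgfp_u2c_values (cp : List (String × List (String × String))) :
    (cgfpU2c cp).values = (cgfpU2c cp).keys.map (fun u => cgfpG cp u) :=
  PySem.Dict.values_eq_map_keys _ (cgfp_nodup_u2c_keys cp) []

lemma cgfp_cnt_pos_iff (cp : List (String × List (String × String))) (a b : String) :
    1 ≤ cgfpCnt cp a b ↔ ∃ u ∈ (cgfpU2c cp).keys, a ∈ cgfpG cp u ∧ b ∈ cgfpG cp u := by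
  rw [cgfpCnt]
  rw [show (1 ≤ (cgfpU2c cp).keys.countP fun u => decide (a ∈ cgfpG cp u ∧ b ∈ cgfpG cp u)) ↔
      0 < (cgfpU2c cp).keys.countP fun u => decide (a ∈ cgfpG cp u ∧ b ∈ cgfpG cp u) from
    Nat.lt_iff_add_one_le.symm]
  rw [List.countP_pos_iff]
  constructor
  · rintro ⟨u, hu, h⟩; exact ⟨u, hu, of_decide_eq_true h⟩
  · rintro ⟨u, hu, h⟩; exact ⟨u, hu, decide_eq_true h⟩

lemma cgfp_prs_getD (cp : List (String × List (String × String))) (y : String × String) :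
    (cgfpPrs cp).getD y 0 = if y.1 < y.2 then (cgfpCnt cp y.1 y.2 : Int) else 0 := by
  rw [cgfpPrs, cgfp_prs_fold_getD _ _ (by
    rw [cgfp_u2c_values]
    rintro CC hCC
    rcases List.mem_map.mp hCC with ⟨u, _, rfl⟩
    exact cgfp_nodup_G cp u)]
  rw [PySem.Dict.getD_empty, cgfp_u2c_values, List.countP_map]
  by_cases hlt : y.1 < y.2
  · rw [if_pos hlt, cgfpCnt, zero_add]
    refine congrArg Nat.cast (List.countP_congr ?_)
    intro u _
    simp only [Function.comp]
    simp only [decide_eq_true_iff]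
    rw [cgfp_mem_pvPairs_sorted (cgfp_nodup_G cp u) y]
    exact ⟨fun h => ⟨h.1, h.2.1⟩, fun h => ⟨h.1, h.2, hlt⟩⟩
  · rw [if_neg hlt, zero_add, Nat.cast_eq_zero, List.countP_eq_zero]
    intro u _
    simp only [Function.comp, decide_eq_true_iff]
    intro hmem
    exact hlt ((cgfp_mem_pvPairs_sorted (cgfp_nodup_G cp u) y).mp hmem).2.2

lemma cgfp_prs_keys (cp : List (String × List (String × String))) (y : String × String) :
    y ∈ (cgfpPrs cp).keys ↔ y.1 < y.2 ∧ 1 ≤ cgfpCnt cp y.1 y.2 := by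
  rw [cgfpPrs, cgfp_prs_fold_keys]
  simp only [PySem.Dict.keys_empty, List.not_mem_nil, false_or]
  rw [cgfp_u2c_values, cgfp_cnt_pos_iff]
  constructor
  · rintro ⟨CC, hCC, h⟩
    rcases List.mem_map.mp hCC with ⟨u, hu, rfl⟩
    rcases (cgfp_mem_pvPairs_sorted (cgfp_nodup_G cp u) y).mp h with ⟨h1, h2, h3⟩
    exact ⟨h3, u, hu, h1, h2⟩
  · rintro ⟨hlt, u, hu, h1, h2⟩
    exact ⟨cgfpG cp u, List.mem_map.mpr ⟨u, hu, rfl⟩,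
      (cgfp_mem_pvPairs_sorted (cgfp_nodup_G cp u) y).mpr ⟨h1, h2, hlt⟩⟩

lemma cgfp_memA (cp : List (String × List (String × String))) (k : Int) (y : String × String) :
    y ∈ cgfpEsA cp k ↔ cgfpE cp k y := by
  by_cases hk : k ≤ 1
  · rw [cgfp_esA_branch1 cp k hk, cgfpE, max_eq_right hk]
    rw [pvMemFoldlStep _ _ (fun uCC y => y ∈ pvPairs (PySem.List.sorted uCC.2 (fun x => x)))
      (fun s u y => by
        rw [PySem.Set.mem_foldl_add _ (fun b => b)]
        constructor
        · rintro (h | ⟨b, hb, rfl⟩); exact Or.inl h; exact Or.inr hb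
        · rintro (h | hb); exact Or.inl h; exact Or.inr ⟨y, hb, rfl⟩)]
    simp only [PySem.Set.empty, List.not_mem_nil, false_or]
    constructor
    · rintro ⟨uCC, huCC, h⟩
      rcases cgfp_mem_u2c_items.mp huCC with ⟨hu, hCC⟩
      rw [hCC] at h
      rcases (cgfp_mem_pvPairs_sorted (cgfp_nodup_G cp uCC.1) y).mp h with ⟨h1, h2, h3⟩
      refine ⟨h3, ?_⟩
      have := (cgfp_cnt_pos_iff cp y.1 y.2).mpr ⟨uCC.1, hu, h1, h2⟩
      omega
    · rintro ⟨hlt, hcnt⟩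
      have : 1 ≤ cgfpCnt cp y.1 y.2 := by omega
      rcases (cgfp_cnt_pos_iff cp y.1 y.2).mp this with ⟨u, hu, h1, h2⟩
      refine ⟨(u, cgfpG cp u), cgfp_mem_u2c_items.mpr ⟨hu, rfl⟩, ?_⟩
      exact (cgfp_mem_pvPairs_sorted (cgfp_nodup_G cp u) y).mpr ⟨h1, h2, hlt⟩
  · rw [cgfp_esA_branch2 cp k hk, cgfpE, max_eq_left (by omega)]
    rw [PySem.Set.mem_ofList, List.mem_map]
    constructor
    · rintro ⟨pc, hpc, rfl⟩
      rcases List.mem_filter.mp hpc with ⟨hpc, hle⟩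
      have hle : k ≤ pc.2 := of_decide_eq_true hle
      have hkeys : pc.1 ∈ (cgfpPrs cp).keys := PySem.Dict.mem_keys_of_mem_items _ hpc
      have hval : (cgfpPrs cp).getD pc.1 0 = pc.2 :=
        PySem.Dict.getD_of_mem_items _ (show (pc.1, pc.2) ∈ _ from hpc)
          (cgfp_prs_fold_keys_nodup _ _ (by simp)) 0
      rcases (cgfp_prs_keys cp pc.1).mp hkeys with ⟨hlt, hcnt⟩
      refine ⟨hlt, ?_⟩
      rw [cgfp_prs_getD, if_pos hlt] at hval
      omega
    · rintro ⟨hlt, hcnt⟩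
      have hcnt1 : 1 ≤ cgfpCnt cp y.1 y.2 := by
        have : (1 : Int) ≤ (cgfpCnt cp y.1 y.2 : Int) := by omega
        exact_mod_cast this
      have hkeys : y ∈ (cgfpPrs cp).keys := (cgfp_prs_keys cp y).mpr ⟨hlt, hcnt1⟩
      rcases hq : (cgfpPrs cp).get? y with _ | v
      · exact absurd ((PySem.Dict.get?_eq_none_iff_not_mem_keys _ _).mp hq) (by simpa using hkeys)
      · have hv : v = (cgfpPrs cp).getD y 0 := by
          rw [PySem.Dict.getD_eq_get?_getD, hq]; rfl
        refine ⟨(y, v), List.mem_filter.mpr ⟨PySem.Dict.mem_items_of_get?_eq_some _ hq, ?_⟩, rfl⟩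
        rw [decide_eq_true_iff, hv, cgfp_prs_getD, if_pos hlt]
        omega

lemma cgfp_nodupA (cp : List (String × List (String × String))) (k : Int) :
    (cgfpEsA cp k).Nodup := by
  by_cases hk : k ≤ 1
  · rw [cgfp_esA_branch1 cp k hk]
    refine pvNodupFoldl _ _ (fun s uCC hs => ?_) _ List.nodup_nil
    exact pvNodupFoldl _ _ (fun s ab hs => PySem.Set.nodup_add _ _ hs) _ hs
  · rw [cgfp_esA_branch2 cp k hk]
    exact PySem.Set.nodup_ofList _

lemma cgfp_altLoop_eq (c2u : PySem.Dict String (PySem.Set String)) (t : Int)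
    (L : List String) (out : List (String × String)) :
    cgfpAltLoop c2u t L out
    = out ++ (pvPairs L).filter (fun ab =>
        decide (t ≤ ((PySem.Set.inter (c2u.getD ab.1 []) (c2u.getD ab.2 [])).length : Int))) := by
  induction L generalizing out with
  | nil => simp [cgfpAltLoop, pvPairs]
  | cons a rest ih =>
    rw [cgfpAltLoop, ih]
    rw [PySem.List.foldl_append_ite
      (fun b => t ≤ ((PySem.Set.inter (c2u.getD a []) (c2u.getD b [])).length : Int))
      (fun b => (a, b))]
    rw [pvPairs, List.filter_append, List.append_assoc]
    congr 1
    congr 1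
    rw [List.filter_map]
    rfl

lemma cgfp_ks_pairwise (cp : List (String × List (String × String))) :
    (PySem.List.sorted (cgfpC2u cp).keys (fun x => x)).Pairwise (· < ·) :=
  cgfp_sorted_pairwise_lt (cgfp_c2u_keys_nodup cp)

def cgfpOut (cp : List (String × List (String × String))) (k : Int) : List (String × String) :=
  cgfpAltLoop (cgfpC2u cp) (max k 1) (PySem.List.sorted (cgfpC2u cp).keys (fun x => x)) []

lemma cgfp_out_eq_filter (cp : List (String × List (String × String))) (k : Int) :
    cgfpOut cp k = (pvPairs (PySem.List.sorted (cgfpC2u cp).keys (fun x => x))).filter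
      (fun ab => decide (max k 1 ≤ ((PySem.Set.inter ((cgfpC2u cp).getD ab.1 [])
        ((cgfpC2u cp).getD ab.2 [])).length : Int))) := by
  rw [cgfpOut, cgfp_altLoop_eq, List.nil_append]

lemma cgfp_memB (cp : List (String × List (String × String))) (k : Int) (y : String × String) :
    y ∈ cgfpOut cp k ↔ cgfpE cp k y := by
  rw [cgfp_out_eq_filter, List.mem_filter, pvPairs_mem_iff (cgfp_ks_pairwise cp),
    (PySem.List.sorted_perm (cgfpC2u cp).keys (fun x => x) false).mem_iff,
    (PySem.List.sorted_perm (cgfpC2u cp).keys (fun x => x) false).mem_iff,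
    decide_eq_true_iff, cgfpE]
  have hSS : ((PySem.Set.inter ((cgfpC2u cp).getD y.1 []) ((cgfpC2u cp).getD y.2 [])).length : Int)
      = (cgfpCnt cp y.1 y.2 : Int) := by
    rw [cgfp_cnt_eq_inter]; rfl
  rw [hSS]
  constructor
  · rintro ⟨⟨_, _, hlt⟩, hcnt⟩
    exact ⟨hlt, hcnt⟩
  · rintro ⟨hlt, hcnt⟩
    have h1 : 1 ≤ cgfpCnt cp y.1 y.2 := by
      have h := le_max_right k 1
      have : (1 : Int) ≤ (cgfpCnt cp y.1 y.2 : Int) := le_trans h hcnt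
      exact_mod_cast this
    rcases (cgfp_cnt_pos_iff cp y.1 y.2).mp h1 with ⟨u, _, ha, hb⟩
    have hy1 : y.1 ∈ (cgfpC2u cp).keys := by
      rcases cgfp_mem_S.mp (cgfp_mem_S_G.mp ha) with ⟨cw, hcw, h1, _⟩
      rw [cgfp_c2u_keys]; exact List.mem_map.mpr ⟨cw, hcw, h1⟩
    have hy2 : y.2 ∈ (cgfpC2u cp).keys := by
      rcases cgfp_mem_S.mp (cgfp_mem_S_G.mp hb) with ⟨cw, hcw, h2, _⟩
      rw [cgfp_c2u_keys]; exact List.mem_map.mpr ⟨cw, hcw, h2⟩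
    exact ⟨⟨hy1, hy2, hlt⟩, hcnt⟩

lemma cgfp_nodupB (cp : List (String × List (String × String))) (k : Int) :
    (cgfpOut cp k).Nodup := by
  rw [cgfp_out_eq_filter]
  exact (pvPairs_nodup ((PySem.List.sorted_perm (cgfpC2u cp).keys (fun x => x)
    false).nodup_iff.mpr (cgfp_c2u_keys_nodup cp))).sublist List.filter_sublist

lemma cgfp_pairwiseB (cp : List (String × List (String × String))) (k : Int) :
    (cgfpOut cp k).Pairwise (fun a b => toLex a < toLex b) := by
  rw [cgfp_out_eq_filter]
  exact (pvPairs_pairwise_lex (cgfp_ks_pairwise cp)).sublist List.filter_sublist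

lemma cgfp_sorted2_eq_sorted_toLex (xs : List (String × String)) :
    PySem.List.sorted2 xs (fun x => x.1) (fun x => x.2)
    = PySem.List.sorted xs (fun x => toLex x) := by
  have hbef : (fun a b : String × String =>
      (decide (a.1 < b.1) || (!decide (b.1 < a.1) && decide (a.2 < b.2))))
      = (fun a b : String × String => decide (toLex a < toLex b)) := by
    funext a b
    rcases lt_trichotomy a.1 b.1 with h | h | h
    · simp [h, Prod.Lex.lt_iff]
    · simp [h, Prod.Lex.lt_iff]
    · have hne : a.1 ≠ b.1 := fun h' => absurd (h' ▸ h) (lt_irrefl b.1)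
      simp [Prod.Lex.lt_iff, lt_asymm h, h, hne]
  simp only [PySem.List.sorted2, PySem.List.sorted, if_neg (by decide : ¬ (false = true))]
  rw [hbef]

lemma cgfp_A_eq (cp : List (String × List (String × String))) (k : Int) :
    contig_graph_from_paths cp k
    = PySem.List.sorted2 (cgfpEsA cp k) (fun x => x.1) (fun x => x.2) := rfl

lemma cgfp_B_eq (cp : List (String × List (String × String))) (k : Int) :
    contig_graph_from_paths_alt cp k = cgfpOut cp k := rfl

-- ===== VERDICT (by name: the statement is the Claim_ definition above) =====
theorem contig_graph_from_paths_spec : Claim_equal_contig_graph_from_paths := by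
  intro cp k _
  unfold Spec_contig_graph_from_paths
  rw [cgfp_A_eq, cgfp_sorted2_eq_sorted_toLex, cgfp_B_eq]
  have hperm : (cgfpOut cp k).Perm (cgfpEsA cp k) := by
    rw [List.perm_ext_iff_of_nodup (cgfp_nodupB cp k) (cgfp_nodupA cp k)]
    intro y; rw [cgfp_memB, cgfp_memA]
  exact (PySem.List.sorted_eq_of_perm_of_pairwise_lt _ _ (fun x => toLex x) hperm (cgfp_pairwiseB cp k))
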